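-- pv_equiv track=rewrite | github.com/tiendreiliass0x/ai-agent-platform | backend/app/services/profile_enrichment_pipeline.py | _categorize_pages
-- ===== SOURCE A (Python) =====
-- from typing import Dict, List, Any, Optional
--
-- def _categorize_pages(pages: List[str]) -> Dict[str, int]:
--     """Categorize visited pages to understand interests"""
--
--     categories = {}
--     for page in pages:
--         if "pricing" in page.lower():
--             categories["pricing"] = categories.get("pricing", 0) + 1
--         elif "features" in page.lower():
--             categories["features"] = categories.get("features", 0) + 1
--         elif "docs" in page.lower() or "documentation" in page.lower():
--             categories["documentation"] = categories.get("documentation", 0) + 1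
--         # Add more categorization logic
--
--     return categories
-- ===== SOURCE B (Python) =====
-- # Staged rewrite: classify each page to a label, then build the result by
-- # counting each distinct label, instead of accumulating counts in one pass.
--
-- def _classify(page):
--     low = page.lower()
--     if "pricing" in low:
--         return "pricing"
--     if "features" in low:
--         return "features"
--     if "docs" in low or "documentation" in low:
--         return "documentation"
--     return None
--
-- def _categorize_pages(pages):
--     """Categorize visited pages to understand interests"""
--     labels = [_classify(p) for p in pages]
--     present = [l for l in labels if l is not None]
--     return {name: present.count(name) for name in dict.fromkeys(present)}
-- ===== Notes on version B (the rewrite author's own statement) =====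
-- stated objective: simpler
-- what changed: Replaces A's single-pass dict accumulation with if/elif counting into the dict with staged passes: classify each page to a label (lowercasing once), filter out unmatched pages, then build the result dict by counting each distinct label with list.count over the label list.
import Mathlib
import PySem

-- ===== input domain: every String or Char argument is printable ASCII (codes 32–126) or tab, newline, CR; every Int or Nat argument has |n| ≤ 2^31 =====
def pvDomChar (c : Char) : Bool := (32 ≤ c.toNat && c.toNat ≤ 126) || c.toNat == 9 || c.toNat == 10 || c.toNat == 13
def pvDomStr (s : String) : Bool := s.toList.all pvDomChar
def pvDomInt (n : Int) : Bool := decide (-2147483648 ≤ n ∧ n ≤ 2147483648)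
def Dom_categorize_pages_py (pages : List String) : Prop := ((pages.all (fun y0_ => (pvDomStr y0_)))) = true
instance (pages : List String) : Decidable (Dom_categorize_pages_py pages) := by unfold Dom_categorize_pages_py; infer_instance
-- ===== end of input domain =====

-- B replaces A's single-pass dict accumulation with staged passes (classify each page to a
-- label, drop unmatched pages, then count each distinct label); same result, simpler decomposition.

-- ===== PORT A =====
def categorize_pages_py (pages : List String) : List (String × Int) :=
  (pages.foldl (fun categories page =>
    if PySem.Str.isIn "pricing" (PySem.Str.lower page) then
      categories.insert "pricing" (categories.getD "pricing" 0 + 1)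
    else if PySem.Str.isIn "features" (PySem.Str.lower page) then
      categories.insert "features" (categories.getD "features" 0 + 1)
    else if PySem.Str.isIn "docs" (PySem.Str.lower page) || PySem.Str.isIn "documentation" (PySem.Str.lower page) then
      categories.insert "documentation" (categories.getD "documentation" 0 + 1)
    else categories) (PySem.Dict.empty : PySem.Dict String Int)).items

-- ===== PORT B =====
-- helper _classify from Source B
def pvClassify (page : String) : Option String :=
  let low := PySem.Str.lower page
  if PySem.Str.isIn "pricing" low then some "pricing"
  else if PySem.Str.isIn "features" low then some "features"
  else if PySem.Str.isIn "docs" low || PySem.Str.isIn "documentation" low then some "documentation"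
  else none

-- labels = [_classify(p) for p in pages]; present = [l for l in labels if l is not None]
-- (filterMap id: keep the non-None labels); dict.fromkeys(present) = PySem.List.dedup present.
def categorize_pages_py_alt (pages : List String) : List (String × Int) :=
  let labels := pages.map pvClassify
  let present := labels.filterMap id
  (PySem.List.dedup present).map (fun name => (name, (present.count name : Int)))

-- ===== PRECONDITION & SPEC =====
def Spec_categorize_pages_py (pages : List String) (out : List (String × Int)) : Prop := out = categorize_pages_py_alt pages
instance (pages : List String) (out : List (String × Int)) : Decidable (Spec_categorize_pages_py pages out) := by unfold Spec_categorize_pages_py; infer_instance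

-- ===== CLAIM (what is proved, stated in full; the proofs are below) =====
def Claim_equal_categorize_pages_py : Prop := ∀ (pages : List String), Dom_categorize_pages_py pages → Spec_categorize_pages_py pages (categorize_pages_py pages)

-- ===== LEMMAS AND PROOFS =====
-- A's per-page update is exactly the insert-step applied to the page's label.
theorem pv_step_eq (d : PySem.Dict String Int) (page : String) :
    (if PySem.Str.isIn "pricing" (PySem.Str.lower page) then
      d.insert "pricing" (d.getD "pricing" 0 + 1)
    else if PySem.Str.isIn "features" (PySem.Str.lower page) then
      d.insert "features" (d.getD "features" 0 + 1)
    else if PySem.Str.isIn "docs" (PySem.Str.lower page) || PySem.Str.isIn "documentation" (PySem.Str.lower page) then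
      d.insert "documentation" (d.getD "documentation" 0 + 1)
    else d)
    =
    (match pvClassify page with
     | some name => d.insert name (d.getD name 0 + 1)
     | none => d) := by
  unfold pvClassify
  split_ifs <;> simp_all

-- A fold of the optional insert-step over labels is the counter fold over the present labels.
theorem pv_foldl_opt (ls : List (Option String)) (d : PySem.Dict String Int) :
    ls.foldl (fun d lab =>
      match lab with
      | some name => d.insert name (d.getD name 0 + 1)
      | none => d) d
    = (ls.filterMap id).foldl (fun d name => d.insert name (d.getD name 0 + 1)) d := by
  induction ls generalizing d with
  | nil => rfl
  | cons lab t ih => cases lab <;> simp [ih]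

-- ===== VERDICT (by name: the statement is the Claim_ definition above) =====
theorem categorize_pages_py_spec : Claim_equal_categorize_pages_py := by
  intro pages _
  unfold Spec_categorize_pages_py categorize_pages_py categorize_pages_py_alt
  have h1 : pages.foldl (fun categories page =>
      if PySem.Str.isIn "pricing" (PySem.Str.lower page) then
        categories.insert "pricing" (categories.getD "pricing" 0 + 1)
      else if PySem.Str.isIn "features" (PySem.Str.lower page) then
        categories.insert "features" (categories.getD "features" 0 + 1)
      else if PySem.Str.isIn "docs" (PySem.Str.lower page) || PySem.Str.isIn "documentation" (PySem.Str.lower page) then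
        categories.insert "documentation" (categories.getD "documentation" 0 + 1)
      else categories) (PySem.Dict.empty : PySem.Dict String Int)
      = (pages.map pvClassify).foldl (fun d lab =>
          match lab with
          | some name => d.insert name (d.getD name 0 + 1)
          | none => d) (PySem.Dict.empty : PySem.Dict String Int) := by
    rw [List.foldl_map]
    apply PySem.List.foldl_congr_mem
    intro d page _
    exact pv_step_eq d page
  rw [h1, pv_foldl_opt, PySem.Dict.foldl_insert_getD_add_one_eq_counter,
      PySem.Dict.items_counter]
  simp [PySem.List.dedup_eq_ofList]
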